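-- pv_equiv track=rewrite | github.com/IonutZbir/Universita | Primo Anno/Programmazione/Python/esameING/Esercitazioni/2023_05_25/2019_07_11_EsameConSoluzione.py | primoEsercizio
-- ===== SOURCE A (Python) =====
-- def primoEsercizio(immagine):
--     righe = immagine.split("\n")
--     righe.pop()  # senza argomento, equivale a -1 cioè a togliere l'ultimo elemento
--
--     n = len(righe)
--
--     meta = n // 2
--
--     croce = True
--
--     # si verifica che la riga di mezzo sia fatta solo da *
--     croce = croce and righe[meta] == "*"*n
--
--     # fino alla metà, si verifica che la riga i e la sua corrispondente dalla fine (n - i - 1)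
--     # siano fatte di spazi e un solo asterisco al centro
--     for i in range(meta):
--         croce = croce and righe[i] == " "*meta + "*" + " "*meta and righe[n - i-1] == " "*meta + "*" + " "*meta
--
--     # si noti che in questa soluzione non è necessario verificare che n sia dispari
--     # infatti, se n è pari:
--     # prima di tutto abbiamo verificato che la riga indice meta sia fatta da soli asterischi
--     # ma poi nel ciclo for, quando i vale (meta - 1) si ha che la corrispondente riga dalla fine
--     # ha indice (n - (meta - 1) - 1) = (n - meta + 1 - 1) = n - meta = meta (poiché n è pari)
--     # Quindi, nel ciclo for andiamo a verificare che la medesima riga d'indice meta sia fatta da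
--     # spazi con un asterisco al centro
--     # Tuttavia, è impossibile che la stessa riga soddisfi entrambi i pattern, quindi tutte
--     # le immagini di dimensione pari saranno scartate
--
--     if croce:
--         return "+"
--     else:
--         return "s"
-- ===== SOURCE B (Python) =====
-- def primoEsercizio(immagine):
--     righe = immagine.split("\n")
--     righe.pop()
--     n = len(righe)
--     meta = n // 2
--     # middle row must be all stars (raises IndexError on an empty image, like the original);
--     # a cross needs an odd size; every cell is '*' on the middle row/column, ' ' elsewhere
--     ok = righe[meta] == "*" * n and n % 2 == 1 and all(
--         len(riga) == n and all(
--             ch == ('*' if r == meta or c == meta else ' ')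
--             for c, ch in enumerate(riga))
--         for r, riga in enumerate(righe))
--     return "+" if ok else "s"
-- ===== Notes on version B (the rewrite author's own statement) =====
-- stated objective: alternative
-- what changed: A compares each remaining row to a built template string and pairs row i with its mirror n-i-1, relying on an implicit parity argument to reject even sizes; B keeps only the middle-row guard, makes the parity test explicit, and validates every cell with a per-cell predicate (char is '*' iff on the middle row or middle column, ' ' otherwise) over an enumerate of rows and columns, with no template construction and no mirror pairing.
import Mathlib
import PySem

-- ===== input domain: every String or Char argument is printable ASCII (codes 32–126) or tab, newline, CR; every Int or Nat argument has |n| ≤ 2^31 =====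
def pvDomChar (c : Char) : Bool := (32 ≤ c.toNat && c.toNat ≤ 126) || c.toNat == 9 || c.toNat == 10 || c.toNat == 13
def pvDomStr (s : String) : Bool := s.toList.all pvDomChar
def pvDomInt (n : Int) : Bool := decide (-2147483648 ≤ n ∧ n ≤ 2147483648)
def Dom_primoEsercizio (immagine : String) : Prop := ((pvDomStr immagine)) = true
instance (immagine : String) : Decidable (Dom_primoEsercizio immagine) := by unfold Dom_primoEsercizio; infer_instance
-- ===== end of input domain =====

-- B replaces A's template-row construction and mirror-row pairing by an explicit parity test
-- plus a per-cell check; equal return values are proved on all inputs containing a newline.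

-- ===== PORT A =====
def primoEsercizio (immagine : String) : String :=
  let righe := ((PySem.Str.split? immagine "\n").getD []).dropLast  -- split("\n") (sep ≠ "", always some) then .pop()
  let n := PySem.List.len righe
  let metaN := PySem.Int.floordiv n 2
  let croce := true
  let croce := croce && (PySem.List.pyGetD righe metaN "" ==
      String.ofList (PySem.List.pyRepeat "*".toList n))
  let croce := (PySem.List.pyRange 0 metaN 1).foldl (fun c i =>
      c && (PySem.List.pyGetD righe i "" ==
              String.ofList (PySem.List.pyRepeat " ".toList metaN ++ "*".toList ++ PySem.List.pyRepeat " ".toList metaN))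
        && (PySem.List.pyGetD righe (n - i - 1) "" ==
              String.ofList (PySem.List.pyRepeat " ".toList metaN ++ "*".toList ++ PySem.List.pyRepeat " ".toList metaN))) croce
  if croce then "+" else "s"

-- ===== PORT B =====
def primoEsercizio_alt (immagine : String) : String :=
  let righe := ((PySem.Str.split? immagine "\n").getD []).dropLast
  let n := PySem.List.len righe
  let metaN := PySem.Int.floordiv n 2
  let ok := (PySem.List.pyGetD righe metaN "" ==
      String.ofList (PySem.List.pyRepeat "*".toList n)) &&
    ((PySem.Int.mod n 2 == 1) &&
    (PySem.List.enumerate righe).all (fun p =>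
      (PySem.Str.len p.2 == n) &&
      (PySem.List.enumerate p.2.toList).all (fun q =>
        q.2 == (if p.1 == metaN || q.1 == metaN then '*' else ' '))))
  if ok then "+" else "s"

-- ===== PRECONDITION & SPEC =====
-- A indexes righe[meta] after popping the last split piece; when immagine contains no "\n"
-- the list is empty and A raises IndexError, so exactly those inputs are excluded.
def Pre_primoEsercizio (immagine : String) : Prop := PySem.Str.isIn "\n" immagine = true
instance (immagine : String) : Decidable (Pre_primoEsercizio immagine) := by unfold Pre_primoEsercizio; infer_instance
def pvWitness_primoEsercizio : String := "*\n"

def Spec_primoEsercizio (immagine : String) (out : String) : Prop := out = primoEsercizio_alt immagine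
instance (immagine : String) (out : String) : Decidable (Spec_primoEsercizio immagine out) := by unfold Spec_primoEsercizio; infer_instance

-- ===== CLAIM (what is proved, stated in full; the proofs are below) =====
def Claim_equal_primoEsercizio : Prop := ∀ (immagine : String), Dom_primoEsercizio immagine → Pre_primoEsercizio immagine → Spec_primoEsercizio immagine (primoEsercizio immagine)

-- ===== LEMMAS AND PROOFS =====

def pvRowT (m : Nat) : List Char := List.replicate m ' ' ++ '*' :: List.replicate m ' '

lemma pvRowT_length (m : Nat) : (pvRowT m).length = 2 * m + 1 := by
  simp [pvRowT]; omega

lemma pvRowT_getElem (m c : Nat) (hc : c < (pvRowT m).length) :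
    (pvRowT m)[c] = if c = m then '*' else ' ' := by
  rw [pvRowT_length] at hc
  unfold pvRowT
  rcases lt_trichotomy c m with h | h | h
  · rw [List.getElem_append_left (by simpa using h)]
    simp [h.ne]
  · subst h
    rw [List.getElem_append_right (by simp)]
    simp
  · rw [List.getElem_append_right (by simp; omega)]
    simp only [List.length_replicate]
    rw [List.getElem_cons]
    have h1 : ¬ (c - m = 0) := by omega
    simp only [h1, List.getElem_replicate]
    simp [Nat.ne_of_gt h]
lemma pvRowT_char (xs : List Char) (m : Nat) :
    xs = pvRowT m ↔ xs.length = 2 * m + 1 ∧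
      ∀ (c : Nat) (hc : c < xs.length), xs[c] = if c = m then '*' else ' ' := by
  constructor
  · rintro rfl
    exact ⟨pvRowT_length m, fun c hc => pvRowT_getElem m c hc⟩
  · rintro ⟨hl, hc⟩
    apply List.ext_getElem (by rw [hl, pvRowT_length])
    intro i h1 h2
    rw [hc i h1, pvRowT_getElem]

lemma pvStars_char (xs : List Char) (n : Nat) :
    xs = List.replicate n '*' ↔ xs.length = n ∧
      ∀ (c : Nat) (hc : c < xs.length), xs[c] = '*' := by
  constructor
  · rintro rfl; simp
  · rintro ⟨hl, hc⟩
    apply List.ext_getElem (by simp [hl])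
    intro i h1 h2
    simp [hc i h1]

lemma pvFoldl_and {l : List Int} {f g : Int → Bool} {b : Bool} :
    l.foldl (fun c i => c && f i && g i) b = (b && l.all (fun i => f i && g i)) := by
  induction l generalizing b with
  | nil => simp
  | cons a t ih =>
    rw [List.foldl_cons, ih]
    simp [Bool.and_assoc]

lemma pvEnumerate_all {α : Type} (xs : List α) (s : Int) (f : Int × α → Bool) :
    (PySem.List.enumerate xs s).all f = true ↔
      ∀ (k : Nat) (h : k < xs.length), f (s + k, xs[k]) = true := by
  induction xs generalizing s with
  | nil => simp [PySem.List.enumerate]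
  | cons a t ih =>
    simp only [PySem.List.enumerate, List.all_cons, Bool.and_eq_true, ih]
    constructor
    · rintro ⟨h0, h1⟩ k hk
      cases k with
      | zero => simpa using h0
      | succ k =>
        have := h1 k (by simpa using hk)
        simpa [add_assoc, add_comm, add_left_comm] using this
    · intro h
      refine ⟨by simpa using h 0 (by simp), fun k hk => ?_⟩
      have := h (k+1) (by simpa using hk)
      simpa [add_assoc, add_comm, add_left_comm] using this

lemma pvGo_len_ge (sep : List Char) (fuel : Nat) (l cur : List Char) (acc : List (List Char)) :
    acc.length + 1 ≤ (PySem.Chars.splitOn.go sep fuel l cur acc).length := by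
  induction fuel generalizing l cur acc with
  | zero => simp [PySem.Chars.splitOn.go]
  | succ fuel ih =>
    cases l with
    | nil => simp [PySem.Chars.splitOn.go]
    | cons c rest =>
      rw [PySem.Chars.splitOn.go]
      split
      · have := ih (List.drop sep.length (c :: rest)) [] (cur.reverse :: acc)
        simp at this ⊢; omega
      · exact ih rest (c :: cur) acc

lemma pvGo_infix (sep : List Char) (hsep : sep ≠ []) (fuel : Nat) (l cur : List Char)
    (acc : List (List Char)) (hf : l.length < fuel) (hin : sep <:+: l) :
    acc.length + 2 ≤ (PySem.Chars.splitOn.go sep fuel l cur acc).length := by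
  induction fuel generalizing l cur acc with
  | zero => omega
  | succ fuel ih =>
    cases l with
    | nil =>
      exact absurd (List.eq_nil_of_infix_nil hin) hsep
    | cons c rest =>
      rw [PySem.Chars.splitOn.go]
      split
      · have := pvGo_len_ge sep fuel (List.drop sep.length (c :: rest)) [] (cur.reverse :: acc)
        simp at this ⊢; omega
      · rename_i hpre
        have hrest : sep <:+: rest := by
          rcases (List.infix_cons_iff).1 hin with h | h
          · exact absurd (List.isPrefixOf_iff_prefix.2 h) (by simpa using hpre)
          · exact h
        exact ih rest (c :: cur) acc (by simp at hf ⊢; omega) hrest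

lemma pvSplitOn_len (s sep : List Char) (hsep : sep ≠ []) (hin : sep <:+: s) :
    2 ≤ (PySem.Chars.splitOn s sep).length := by
  have := pvGo_infix sep hsep (s.length + 1) s [] [] (by omega) hin
  simpa [PySem.Chars.splitOn] using this

lemma pvStrEq (s : String) (l : List Char) : s = String.ofList l ↔ s.toList = l := by
  constructor
  · rintro rfl; exact String.toList_ofList
  · intro h; rw [← h, String.ofList_toList]

lemma pvRighe_ne_nil (immagine : String) (h : PySem.Str.isIn "\n" immagine = true) :
    ((PySem.Str.split? immagine "\n").getD []).dropLast ≠ [] := by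
  have hinf : ("\n".toList) <:+: immagine.toList := (PySem.Str.isIn_iff_infix _ _).1 h
  have hmap := PySem.Str.split?_map immagine "\n"
  rw [show PySem.Chars.split? immagine.toList "\n".toList
      = some (PySem.Chars.splitOn immagine.toList "\n".toList) by simp [PySem.Chars.split?]] at hmap
  cases hs : PySem.Str.split? immagine "\n" with
  | none => rw [hs] at hmap; simp at hmap
  | some parts =>
    rw [hs] at hmap
    simp only [Option.map_some, Option.some_inj] at hmap
    have hlen : parts.length = (PySem.Chars.splitOn immagine.toList "\n".toList).length := by
      rw [← hmap]; simp
    have h2 := pvSplitOn_len immagine.toList "\n".toList (by decide) hinf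
    simp only [Option.getD_some]
    intro hcon
    have := congrArg List.length hcon
    simp [List.length_dropLast] at this
    omega

lemma pvAB (rs : List String) (hne : rs ≠ []) :
    ((rs.getD (rs.length / 2) "").toList = List.replicate rs.length '*' ∧
     ∀ k < rs.length / 2,
       (rs.getD k "").toList = pvRowT (rs.length / 2) ∧
       (PySem.List.pyGetD rs ((rs.length : Int) - (k : Int) - 1) "").toList = pvRowT (rs.length / 2))
    ↔ (rs.length % 2 = 1 ∧
       ∀ (r : Nat) (h : r < rs.length),
         (rs[r]).toList.length = rs.length ∧
         ∀ (c : Nat) (hc : c < (rs[r]).toList.length),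
           (rs[r]).toList[c] = if r = rs.length / 2 ∨ c = rs.length / 2 then '*' else ' ') := by
  have hNpos : 0 < rs.length := List.length_pos_iff.2 hne
  set N := rs.length with hN
  set m := N / 2 with hm
  have hmN : m < N := by omega
  have hgm : rs.getD m "" = rs[m] := List.getD_eq_getElem rs "" hmN
  have hidx : ∀ k : Nat, k < N → PySem.List.pyGetD rs ((N : Int) - (k : Int) - 1) "" = rs.getD (N - 1 - k) "" := by
    intro k hk
    rw [show ((N : Int) - (k : Int) - 1) = ((N - 1 - k : Nat) : Int) from by omega,
        PySem.List.pyGetD_natCast]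
  constructor
  · rintro ⟨hmid, hpair⟩
    have hodd : N % 2 = 1 := by
      by_contra hev
      have hm1 : m - 1 < m := by omega
      obtain ⟨-, h2⟩ := hpair (m - 1) hm1
      rw [hidx (m - 1) (by omega)] at h2
      rw [show N - 1 - (m - 1) = m from by omega, hmid] at h2
      have := congrArg List.length h2
      simp [pvRowT_length] at this
      omega
    refine ⟨hodd, fun r hr => ?_⟩
    rcases lt_trichotomy r m with hrel | hrel | hrel
    · obtain ⟨h1, -⟩ := hpair r hrel
      rw [List.getD_eq_getElem rs "" hr] at h1
      rw [h1]
      refine ⟨by rw [pvRowT_length]; omega, fun c hc => ?_⟩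
      rw [pvRowT_getElem m c hc, if_congr (show (r = m ∨ c = m) ↔ c = m from by omega) rfl rfl]
    · subst hrel
      rw [hgm] at hmid
      rw [hmid]
      refine ⟨by simp, fun c hc => ?_⟩
      simp [List.getElem_replicate]
    · obtain ⟨-, h2⟩ := hpair (N - 1 - r) (by omega)
      rw [hidx (N - 1 - r) (by omega)] at h2
      rw [show N - 1 - (N - 1 - r) = r from by omega] at h2
      rw [List.getD_eq_getElem rs "" hr] at h2
      rw [h2]
      refine ⟨by rw [pvRowT_length]; omega, fun c hc => ?_⟩
      rw [pvRowT_getElem m c hc, if_congr (show (r = m ∨ c = m) ↔ c = m from by omega) rfl rfl]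
  · rintro ⟨hodd, hall⟩
    have hNm : N = 2 * m + 1 := by omega
    have hrow : ∀ (r : Nat) (hr : r < N), r ≠ m → (rs[r]).toList = pvRowT m := by
      intro r hr hrm
      obtain ⟨hl, hc⟩ := hall r hr
      refine (pvRowT_char _ m).2 ⟨by omega, fun c hcl => ?_⟩
      rw [hc c hcl, if_congr (show (r = m ∨ c = m) ↔ c = m from by omega) rfl rfl]
    refine ⟨?_, fun k hk => ?_⟩
    · obtain ⟨hl, hc⟩ := hall m hmN
      rw [hgm]
      refine (pvStars_char _ N).2 ⟨hl, fun c hcl => ?_⟩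
      rw [hc c hcl, if_pos (Or.inl rfl)]
    · constructor
      · rw [List.getD_eq_getElem rs "" (by omega)]
        exact hrow k (by omega) (by omega)
      · rw [hidx k (by omega), List.getD_eq_getElem rs "" (by omega)]
        exact hrow (N - 1 - k) (by omega) (by omega)

lemma pvRange_all (m : Nat) (f : Nat → Bool) :
    (List.range m).all f = true ↔ ∀ k, k < m → f k = true := by simp

lemma pvCore (rs : List String) (hne : rs ≠ []) :
    (let n := PySem.List.len rs
     let metaN := PySem.Int.floordiv n 2
     let croce := true
     let croce := croce && (PySem.List.pyGetD rs metaN "" ==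
        String.ofList (PySem.List.pyRepeat "*".toList n))
     let croce := (PySem.List.pyRange 0 metaN 1).foldl (fun c i =>
        c && (PySem.List.pyGetD rs i "" ==
                String.ofList (PySem.List.pyRepeat " ".toList metaN ++ "*".toList ++ PySem.List.pyRepeat " ".toList metaN))
          && (PySem.List.pyGetD rs (n - i - 1) "" ==
                String.ofList (PySem.List.pyRepeat " ".toList metaN ++ "*".toList ++ PySem.List.pyRepeat " ".toList metaN))) croce
     if croce then "+" else "s" : String)
    = (let n := PySem.List.len rs
       let metaN := PySem.Int.floordiv n 2
       let ok := (PySem.List.pyGetD rs metaN "" ==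
           String.ofList (PySem.List.pyRepeat "*".toList n)) &&
         ((PySem.Int.mod n 2 == 1) &&
         (PySem.List.enumerate rs).all (fun p =>
           (PySem.Str.len p.2 == n) &&
           (PySem.List.enumerate p.2.toList).all (fun q =>
             q.2 == (if p.1 == metaN || q.1 == metaN then '*' else ' '))))
       if ok then "+" else "s") := by
  have hNpos : 0 < rs.length := List.length_pos_iff.2 hne
  have hlen : PySem.List.len rs = (rs.length : Int) := PySem.List.len_eq rs
  have hfd : PySem.Int.floordiv (rs.length : Int) 2 = ((rs.length / 2 : Nat) : Int) := by
    exact_mod_cast PySem.Int.floordiv_natCast rs.length 2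
  have hmod : PySem.Int.mod (rs.length : Int) 2 = ((rs.length % 2 : Nat) : Int) := by
    exact_mod_cast PySem.Int.mod_natCast rs.length 2
  simp only [hlen, hfd, hmod]
  have hstar : "*".toList = ['*'] := by decide
  have hsp : " ".toList = [' '] := by decide
  simp only [hstar, hsp, PySem.List.pyRepeat_singleton, Int.toNat_natCast,
    PySem.List.pyGetD_natCast, PySem.List.pyRange_zero_nat, Bool.true_and]
  rw [pvFoldl_and]
  congr 1
  refine propext ?_
  simp only [pvEnumerate_all, Bool.and_eq_true, List.all_map, pvRange_all,
    Function.comp, beq_iff_eq, PySem.Str.len_eq, Nat.cast_inj, Nat.cast_eq_one, pvStrEq,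
    PySem.List.pyGetD_natCast, Bool.or_eq_true, zero_add,
    List.append_assoc, List.singleton_append,
    show ∀ m : Nat, List.replicate m ' ' ++ '*' :: List.replicate m ' ' = pvRowT m from fun _ => rfl]
  constructor
  · exact fun h => ⟨h.1, (pvAB rs hne).1 h⟩
  · exact fun h => (pvAB rs hne).2 h.2

-- ===== VERDICT (by name: the statement is the Claim_ definition above) =====
theorem primoEsercizio_spec : Claim_equal_primoEsercizio := by
  intro immagine _ hpre
  unfold Spec_primoEsercizio primoEsercizio primoEsercizio_alt
  exact pvCore _ (pvRighe_ne_nil immagine hpre)
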